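-- pv_equiv track=rewrite | github.com/sriahri/Python-files | rainfall_prediction.py | predictDays
-- ===== SOURCE A (Python) =====
-- def predictDays(days, k):
--     n = len(days)
--     res = []
--     for i in range(k, n - k):
--         for j in range(k, 0, -1):
--             if days[j + i] < days[j + i - 1]:
--                 break
--         else:
--             res.append(i + 1)
--         for j in range(k):
--             if days[j + i] > days[j + i + 1]:
--                 break
--         else:
--             if (i + 1) not in res:
--                 res.remove(i+1)
--
--     return sorted(res)
-- ===== SOURCE B (Python) =====
-- def predictDays(days, k):
--     n = len(days)
--     # asc[j] = length of the maximal nondecreasing run of steps ending at index j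
--     asc = [0] * n
--     for j in range(1, n):
--         asc[j] = asc[j - 1] + 1 if days[j - 1] <= days[j] else 0
--     # window [i, i+k] is nondecreasing iff at least k nondecreasing steps end at i+k
--     # (an empty window, k <= 0, is trivially nondecreasing)
--     return [i + 1 for i in range(k, n - k) if k <= 0 or asc[i + k] >= k]
-- ===== Notes on version B (the rewrite author's own statement) =====
-- stated objective: alternative
-- what changed: Instead of rescanning every window (A's two break/else loops per window plus a dead remove branch and a final sort), B precomputes in one linear pass the length of the maximal nondecreasing run of steps ending at each index and then decides each window with a single comparison asc[i+k] >= k, emitting the results already sorted.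
import Mathlib
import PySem

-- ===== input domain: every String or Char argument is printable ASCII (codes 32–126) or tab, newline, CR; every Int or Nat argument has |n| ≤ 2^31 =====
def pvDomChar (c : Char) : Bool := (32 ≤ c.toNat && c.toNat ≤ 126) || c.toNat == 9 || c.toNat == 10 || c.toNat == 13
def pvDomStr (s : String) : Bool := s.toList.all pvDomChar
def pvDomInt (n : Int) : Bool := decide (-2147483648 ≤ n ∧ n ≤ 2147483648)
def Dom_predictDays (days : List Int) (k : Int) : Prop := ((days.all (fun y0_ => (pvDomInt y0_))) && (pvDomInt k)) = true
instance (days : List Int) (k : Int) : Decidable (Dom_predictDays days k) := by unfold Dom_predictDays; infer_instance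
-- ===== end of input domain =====

-- B replaces A's per-window rescans (two break/else loops per window, a dead remove
-- branch, a final sort) by one pass that precomputes, for every index j, the length
-- of the maximal nondecreasing run of steps ending at j, then tests each window with
-- a single comparison asc[i+k] >= k (objective: alternative algorithm, same result).

-- ===== PORT A =====
-- n = len(days) is written inline as 'PySem.List.len days'; days[x] is always in range
-- when A evaluates it, so pyGetD (default 0) is exact here.
def predictDays (days : List Int) (k : Int) : List Int :=
  PySem.List.sorted
    ((PySem.List.pyRange k (PySem.List.len days - k) 1).foldl (fun res i =>
      -- for j in range(k, 0, -1): if days[j+i] < days[j+i-1]: break / else: res.append(i+1)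
      let res :=
        if (PySem.List.pyRange k 0 (-1)).any (fun j =>
            decide (PySem.List.pyGetD days (j + i) 0 < PySem.List.pyGetD days (j + i - 1) 0))
        then res else res ++ [i + 1]
      -- for j in range(k): if days[j+i] > days[j+i+1]: break / else: if (i+1) not in res: res.remove(i+1)
      if (PySem.List.pyRange 0 k 1).any (fun j =>
          decide (PySem.List.pyGetD days (j + i) 0 > PySem.List.pyGetD days (j + i + 1) 0))
      then res
      else if (i + 1) ∈ res then res
      else ((PySem.List.remove? res (i + 1)).getD res)) [])  -- remove would raise ValueError, but i+1 ∈ res whenever this branch runs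
    (fun x => x) false

-- ===== PORT B =====
-- asc is built by the for-loop over range(1, n) mutating asc[j] (List.set); the
-- comprehension's 'k <= 0 or asc[i+k] >= k' short-circuits exactly like Python's 'or',
-- and asc[i+k]/asc[j-1]/days[..] are in range whenever evaluated, so pyGetD is exact.
def predictDays_alt (days : List Int) (k : Int) : List Int :=
  let n := PySem.List.len days
  let asc := (PySem.List.pyRange 1 n 1).foldl (fun asc j =>
      asc.set j.toNat
        (if PySem.List.pyGetD days (j - 1) 0 ≤ PySem.List.pyGetD days j 0
         then PySem.List.pyGetD asc (j - 1) 0 + 1 else 0))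
    (List.replicate days.length 0)
  ((PySem.List.pyRange k (n - k) 1).filter (fun i =>
      decide (k ≤ 0) || decide (k ≤ PySem.List.pyGetD asc (i + k) 0))).map (fun i => i + 1)

-- ===== PRECONDITION & SPEC =====
def Spec_predictDays (days : List Int) (k : Int) (out : List Int) : Prop := out = predictDays_alt days k
instance (days : List Int) (k : Int) (out : List Int) : Decidable (Spec_predictDays days k out) := by unfold Spec_predictDays; infer_instance

-- ===== CLAIM (what is proved, stated in full; the proofs are below) =====
def Claim_equal_predictDays : Prop := ∀ (days : List Int) (k : Int), Dom_predictDays days k → Spec_predictDays days k (predictDays days k)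

-- ===== LEMMAS AND PROOFS =====

-- A's per-window test, as a named predicate on the window start i
def windowOk (days : List Int) (k i : Int) : Bool :=
  (PySem.List.pyRange i (i + k) 1).all (fun j =>
    decide (PySem.List.pyGetD days j 0 ≤ PySem.List.pyGetD days (j + 1) 0))

lemma windowOk_iff (days : List Int) (k i : Int) :
    windowOk days k i = true ↔
      ∀ j : Int, i ≤ j → j < i + k →
        PySem.List.pyGetD days j 0 ≤ PySem.List.pyGetD days (j + 1) 0 := by
  simp [windowOk, List.all_eq_true, PySem.List.mem_pyRange_one]

-- A's first break-loop finds a violation iff the window is not non-decreasing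
lemma any1_eq (days : List Int) (k i : Int) :
    (PySem.List.pyRange k 0 (-1)).any (fun j =>
        decide (PySem.List.pyGetD days (j + i) 0 < PySem.List.pyGetD days (j + i - 1) 0))
      = !windowOk days k i := by
  by_cases hw : ∀ j : Int, i ≤ j → j < i + k →
      PySem.List.pyGetD days j 0 ≤ PySem.List.pyGetD days (j + 1) 0
  · rw [(windowOk_iff days k i).mpr hw]
    simp only [Bool.not_true]
    rw [List.any_eq_false]
    intro j hj
    rw [PySem.List.mem_pyRange_neg_one] at hj
    have h1 : j + i - 1 + 1 = j + i := by omega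
    have h2 := hw (j + i - 1) (by omega) (by omega)
    rw [h1] at h2
    simpa using h2
  · have hwf : windowOk days k i = false := by
      rw [← Bool.not_eq_true, windowOk_iff]; exact hw
    rw [hwf]
    push Not at hw
    obtain ⟨m, h1, h2, h3⟩ := hw
    simp only [Bool.not_false]
    rw [List.any_eq_true]
    refine ⟨m - i + 1, ?_, ?_⟩
    · rw [PySem.List.mem_pyRange_neg_one]; omega
    · have e1 : m - i + 1 + i = m + 1 := by omega
      have e2 : m - i + 1 + i - 1 = m := by omega
      rw [e2, e1]
      exact decide_eq_true h3

-- A's second break-loop tests the same condition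
lemma any2_eq (days : List Int) (k i : Int) :
    (PySem.List.pyRange 0 k 1).any (fun j =>
        decide (PySem.List.pyGetD days (j + i) 0 > PySem.List.pyGetD days (j + i + 1) 0))
      = !windowOk days k i := by
  by_cases hw : ∀ j : Int, i ≤ j → j < i + k →
      PySem.List.pyGetD days j 0 ≤ PySem.List.pyGetD days (j + 1) 0
  · rw [(windowOk_iff days k i).mpr hw]
    simp only [Bool.not_true]
    rw [List.any_eq_false]
    intro j hj
    rw [PySem.List.mem_pyRange_one] at hj
    have h2 := hw (j + i) (by omega) (by omega)
    simpa using h2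
  · have hwf : windowOk days k i = false := by
      rw [← Bool.not_eq_true, windowOk_iff]; exact hw
    rw [hwf]
    push Not at hw
    obtain ⟨m, h1, h2, h3⟩ := hw
    simp only [Bool.not_false]
    rw [List.any_eq_true]
    refine ⟨m - i, ?_, ?_⟩
    · rw [PySem.List.mem_pyRange_one]; omega
    · have e1 : m - i + i = m := by omega
      have e2 : m - i + i + 1 = m + 1 := by omega
      rw [e2, e1]
      exact decide_eq_true h3

-- A's loop body appends i+1 exactly when the window is non-decreasing; the remove branch never fires
lemma bodyA_eq (days : List Int) (k : Int) (res : List Int) (i : Int) :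
    (let res' :=
        if (PySem.List.pyRange k 0 (-1)).any (fun j =>
            decide (PySem.List.pyGetD days (j + i) 0 < PySem.List.pyGetD days (j + i - 1) 0))
        then res else res ++ [i + 1]
      if (PySem.List.pyRange 0 k 1).any (fun j =>
          decide (PySem.List.pyGetD days (j + i) 0 > PySem.List.pyGetD days (j + i + 1) 0))
      then res'
      else if (i + 1) ∈ res' then res'
      else ((PySem.List.remove? res' (i + 1)).getD res'))
      = if windowOk days k i then res ++ [i + 1] else res := by
  rw [any1_eq, any2_eq]
  cases hw : windowOk days k i <;> simp

-- A's folded result is the windows filtered by windowOk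
lemma predictDays_res_eq (days : List Int) (k : Int) :
    ((PySem.List.pyRange k (PySem.List.len days - k) 1).foldl (fun res i =>
      let res :=
        if (PySem.List.pyRange k 0 (-1)).any (fun j =>
            decide (PySem.List.pyGetD days (j + i) 0 < PySem.List.pyGetD days (j + i - 1) 0))
        then res else res ++ [i + 1]
      if (PySem.List.pyRange 0 k 1).any (fun j =>
          decide (PySem.List.pyGetD days (j + i) 0 > PySem.List.pyGetD days (j + i + 1) 0))
      then res
      else if (i + 1) ∈ res then res
      else ((PySem.List.remove? res (i + 1)).getD res)) [])
      = ((PySem.List.pyRange k (PySem.List.len days - k) 1).filter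
          (windowOk days k)).map (fun i => i + 1) := by
  refine (PySem.List.foldl_congr_mem _ _
      (fun res i => if windowOk days k i then res ++ [i + 1] else res) _
      (fun res i _ => bodyA_eq days k res i)).trans ?_
  rw [PySem.List.foldl_append_if]
  rfl

-- B's run-length recurrence, as a function of the index
def ascF (days : List Int) : Nat → Int
  | 0 => 0
  | j + 1 =>
    if PySem.List.pyGetD days (j : Int) 0 ≤ PySem.List.pyGetD days ((j : Int) + 1) 0
    then ascF days j + 1 else 0

lemma ascF_nonneg (days : List Int) : ∀ j : Nat, 0 ≤ ascF days j
  | 0 => le_refl 0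
  | j + 1 => by
    unfold ascF
    split_ifs with h
    · have := ascF_nonneg days j; omega
    · exact le_refl 0

-- the fold in B computes ascF at every index
lemma foldAsc (days : List Int) : ∀ m : Nat, m ≤ days.length →
    (PySem.List.pyRange 1 (m : Int) 1).foldl (fun asc j =>
      asc.set j.toNat
        (if PySem.List.pyGetD days (j - 1) 0 ≤ PySem.List.pyGetD days j 0
         then PySem.List.pyGetD asc (j - 1) 0 + 1 else 0))
      (List.replicate days.length 0)
    = (List.range days.length).map (fun j => if j < m then ascF days j else 0) := by
  intro m
  induction m with
  | zero =>
    intro _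
    rw [PySem.List.pyRange_one_eq_nil (by omega)]
    simp only [List.foldl_nil]
    refine List.ext_getElem (by simp) ?_
    intro j h1 h2
    simp
  | succ m ih =>
    intro hm
    rcases Nat.eq_zero_or_pos m with hm0 | hm1
    · subst hm0
      rw [show ((1 : Nat) : Int) = 1 by norm_num, PySem.List.pyRange_one_eq_nil (by omega)]
      simp only [List.foldl_nil]
      refine List.ext_getElem (by simp) ?_
      intro j h1 h2
      simp only [List.getElem_replicate, List.getElem_map, List.getElem_range]
      split
      · next h => interval_cases j; simp [ascF]
      · rfl
    · have e : ((m : Int) + 1) = ((m + 1 : Nat) : Int) := by push_cast; ring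
      rw [← e, PySem.List.pyRange_one_succ_right (by omega), List.foldl_append, ih (by omega)]
      simp only [List.foldl_cons, List.foldl_nil]
      have hms : (m : Int).toNat = m := by omega
      have hm1' : ((m : Int) - 1) = ((m - 1 : Nat) : Int) := by omega
      have hread : PySem.List.pyGetD
          ((List.range days.length).map (fun j => if j < m then ascF days j else 0))
          ((m : Int) - 1) 0 = ascF days (m - 1) := by
        rw [hm1', PySem.List.pyGetD_natCast, List.getD_eq_getElem?_getD]
        rw [List.getElem?_map, List.getElem?_range (by omega)]
        simp only [Option.map_some, Option.getD_some]
        rw [if_pos (by omega)]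
      rw [hread, hms]
      refine List.ext_getElem (by simp) ?_
      intro j h1 h2
      simp only [List.length_map, List.length_range] at h1 h2 ⊢
      rw [List.getElem_set]
      simp only [List.getElem_map, List.getElem_range]
      by_cases hjm : m = j
      · subst hjm
        rw [if_pos rfl]
        obtain ⟨m', rfl⟩ : ∃ m', m = m' + 1 := ⟨m - 1, by omega⟩
        rw [if_pos (Nat.lt_succ_self (m' + 1))]
        rw [show ((m' + 1 : Nat) : Int) - 1 = (m' : Int) from by push_cast; ring,
            show ((m' + 1 : Nat) : Int) = (m' : Int) + 1 from by push_cast; ring,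
            show m' + 1 - 1 = m' from rfl]
        simp [ascF]
      · rw [if_neg hjm]
        by_cases hj : j < m
        · rw [if_pos hj, if_pos (by omega)]
        · rw [if_neg hj, if_neg (by omega)]

-- ascF j ≥ t iff the last t steps before j are all nondecreasing
lemma ascF_ge_iff (days : List Int) : ∀ (t j : Nat), t ≤ j →
    ((t : Int) ≤ ascF days j ↔ ∀ l : Nat, j - t ≤ l → l < j →
      PySem.List.pyGetD days (l : Int) 0 ≤ PySem.List.pyGetD days ((l : Int) + 1) 0) := by
  intro t
  induction t with
  | zero =>
    intro j _
    constructor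
    · intro _ l h1 h2; omega
    · intro _; exact_mod_cast ascF_nonneg days j
  | succ t ih =>
    intro j hj
    obtain ⟨j', rfl⟩ : ∃ j', j = j' + 1 := ⟨j - 1, by omega⟩
    unfold ascF
    split_ifs with hg
    · rw [show ((t + 1 : Nat) : Int) = (t : Int) + 1 by push_cast; ring]
      constructor
      · intro h l h1 h2
        by_cases hl : l = j'
        · subst hl; exact hg
        · exact ((ih j' (by omega)).mp (by omega)) l (by omega) (by omega)
      · intro h
        have := (ih j' (by omega)).mpr (fun l h1 h2 => h l (by omega) (by omega))
        omega
    · constructor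
      · intro h; exfalso; omega
      · intro h
        exfalso
        exact hg (h j' (by omega) (by omega))

-- B's O(1) test equals A's window scan, for every window start A enumerates
lemma cond_eq_windowOk (days : List Int) (k i : Int)
    (hik : k ≤ i) (hin : i < (days.length : Int) - k) :
    (decide (k ≤ 0) || decide (k ≤ PySem.List.pyGetD
        ((List.range days.length).map (fun j => if j < days.length then ascF days j else 0))
        (i + k) 0))
      = windowOk days k i := by
  by_cases hk : k ≤ 0
  · rw [decide_eq_true hk, Bool.true_or]
    symm
    rw [windowOk_iff]
    intro j h1 h2; omega
  · rw [decide_eq_false hk, Bool.false_or]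
    have hk1 : 1 ≤ k := by omega
    have hi0 : 0 ≤ i := by omega
    have hikn : i + k < (days.length : Int) := by omega
    have e : (i + k) = (((i + k).toNat : Nat) : Int) := by omega
    have hget : PySem.List.pyGetD
        ((List.range days.length).map (fun j => if j < days.length then ascF days j else 0))
        (i + k) 0 = ascF days (i + k).toNat := by
      rw [e, PySem.List.pyGetD_natCast, List.getD_eq_getElem?_getD]
      rw [List.getElem?_map, List.getElem?_range (by omega)]
      simp only [Option.map_some, Option.getD_some]
      rw [if_pos (by omega)]
      congr 1
    rw [hget]
    have hiff := ascF_ge_iff days k.toNat (i + k).toNat (by omega)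
    rw [show ((k.toNat : Nat) : Int) = k by omega] at hiff
    by_cases hw : windowOk days k i = true
    · rw [hw]
      simp only [decide_eq_true_eq]
      rw [hiff]
      intro l h1 h2
      exact (windowOk_iff days k i).mp hw (l : Int) (by omega) (by omega)
    · rw [Bool.not_eq_true] at hw
      rw [hw]
      apply decide_eq_false
      intro hle
      rw [hiff] at hle
      have hw' : ¬ windowOk days k i = true := by simp [hw]
      rw [windowOk_iff] at hw'
      push Not at hw'
      obtain ⟨m, h1, h2, h3⟩ := hw'
      have hx := hle m.toNat (by omega) (by omega)
      rw [show ((m.toNat : Nat) : Int) = m by omega] at hx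
      omega

lemma alt_eq_filter_windowOk (days : List Int) (k : Int) :
    predictDays_alt days k
      = ((PySem.List.pyRange k (PySem.List.len days - k) 1).filter
          (windowOk days k)).map (fun i => i + 1) := by
  unfold predictDays_alt
  dsimp only
  have hlen : PySem.List.len days = ((days.length : Nat) : Int) := by
    simp [PySem.List.len]
  rw [hlen, foldAsc days days.length (le_refl _)]
  congr 1
  refine List.filter_congr ?_
  intro i hi
  rw [PySem.List.mem_pyRange_one] at hi
  exact cond_eq_windowOk days k i hi.1 hi.2

lemma alt_pairwise_lt (days : List Int) (k : Int) :
    (predictDays_alt days k).Pairwise (· < ·) := by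
  rw [alt_eq_filter_windowOk]
  exact ((PySem.List.pairwise_lt_pyRange_one _ _).filter _).map _ (fun a b h => by omega)

-- ===== VERDICT (by name: the statement is the Claim_ definition above) =====
theorem predictDays_spec : Claim_equal_predictDays := by
  intro days k _
  unfold Spec_predictDays predictDays
  rw [predictDays_res_eq, ← alt_eq_filter_windowOk]
  exact PySem.List.sorted_eq_of_perm_of_pairwise_lt _ _ _ (List.Perm.refl _) (alt_pairwise_lt days k)
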